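-- pv_equiv track=rewrite | github.com/EarlMilktea/qailo | src/qailo/util/strops.py | str2binary
-- ===== SOURCE A (Python) =====
-- def str2binary(s):
--     n = len(s)
--     c = 0
--     for i in range(n):
--         assert s[i] == "0" or s[i] == "1"
--         if s[i] == "1":
--             c += 2 ** (n - i - 1)
--     return c
-- ===== SOURCE B (Python) =====
-- def str2binary(s):
--     if len(s) == 0:
--         return 0
--     if len(s) == 1:
--         assert s == "0" or s == "1"
--         return 1 if s == "1" else 0
--     m = len(s) // 2
--     return str2binary(s[:m]) * 2 ** (len(s) - m) + str2binary(s[m:])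
-- ===== Notes on version B (the rewrite author's own statement) =====
-- stated objective: alternative
-- what changed: Replaces A's index loop summing 2**(n-i-1) per '1' by a divide-and-conquer recursion: split the string in half, value = value(left) * 2**len(right) + value(right), with single-character base cases carrying the assert.
import Mathlib
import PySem

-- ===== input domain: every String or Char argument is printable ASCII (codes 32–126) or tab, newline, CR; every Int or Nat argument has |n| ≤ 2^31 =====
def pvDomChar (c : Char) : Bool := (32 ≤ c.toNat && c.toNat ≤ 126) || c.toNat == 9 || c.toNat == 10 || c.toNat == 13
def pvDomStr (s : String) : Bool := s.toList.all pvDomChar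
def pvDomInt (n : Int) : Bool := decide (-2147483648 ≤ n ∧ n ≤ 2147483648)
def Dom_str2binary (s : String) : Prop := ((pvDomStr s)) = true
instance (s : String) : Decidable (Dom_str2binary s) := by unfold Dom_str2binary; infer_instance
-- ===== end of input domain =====

-- B replaces A's per-index loop (adding 2^(n-i-1) per '1') by a divide-and-conquer recursion on string halves.

-- ===== PORT A =====
-- left-to-right loop over indices, adding 2^(n-i-1) for each '1'
def str2binary (s : String) : Int :=
  let l := s.toList
  let n : Int := l.length
  (PySem.List.pyRange 0 n 1).foldl
    (fun c i => if PySem.List.pyGetD l i ' ' = '1' then c + 2 ^ (n - i - 1).toNat else c) 0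

-- ===== PORT B =====
-- divide and conquer: value(s) = value(s[:m]) * 2^(len(s)-m) + value(s[m:]), m = len(s)//2
-- (Python slices s[:m] / s[m:] with 0 ≤ m ≤ len are exactly take/drop)
def pvHalves (l : List Char) : Int :=
  if l.length = 0 then 0
  else if h1 : l.length = 1 then (if l.headD ' ' = '1' then 1 else 0)
  else
    let m := l.length / 2
    pvHalves (l.take m) * 2 ^ (l.length - m) + pvHalves (l.drop m)
termination_by l.length
decreasing_by
  · simp only [List.length_take]; omega
  · simp only [List.length_drop]; omega

def str2binary_alt (s : String) : Int := pvHalves s.toList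

-- ===== PRECONDITION & SPEC =====
-- Pre_ excludes strings containing a character other than '0'/'1': Python A's assert raises AssertionError there (B raises too).
def Pre_str2binary (s : String) : Prop :=
  (s.toList.all (fun c => c == '0' || c == '1')) = true
instance (s : String) : Decidable (Pre_str2binary s) := by unfold Pre_str2binary; infer_instance
def pvWitness_str2binary : String := "1011"

def Spec_str2binary (s : String) (out : Int) : Prop := out = str2binary_alt s
instance (s : String) (out : Int) : Decidable (Spec_str2binary s out) := by unfold Spec_str2binary; infer_instance

-- ===== CLAIM =====
def Claim_equal_str2binary : Prop := ∀ (s : String), Dom_str2binary s → Pre_str2binary s → Spec_str2binary s (str2binary s)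

-- ===== LEMMAS AND PROOFS =====

-- reference value: binary value of a character list ('1' contributes 2^(length of the tail))
def pvVal : List Char → Int
  | [] => 0
  | ch :: t => (if ch = '1' then 2 ^ t.length else 0) + pvVal t

theorem pvVal_append (a b : List Char) :
    pvVal (a ++ b) = pvVal a * 2 ^ b.length + pvVal b := by
  induction a with
  | nil => simp [pvVal]
  | cons ch t ih =>
    rcases eq_or_ne ch '1' with h | h <;>
      simp [pvVal, ih, h, pow_add] <;> ring

theorem pvHalves_eq (l : List Char) : pvHalves l = pvVal l := by
  induction l using pvHalves.induct with
  | case1 l h0 => rw [List.length_eq_zero_iff] at h0; subst h0; simp [pvHalves, pvVal]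
  | case2 l h0 h1 hc =>
    obtain ⟨c, rfl⟩ := List.length_eq_one_iff.mp h1
    simp [pvHalves, pvVal]
  | case3 l h0 h1 hc =>
    obtain ⟨c, rfl⟩ := List.length_eq_one_iff.mp h1
    simp [pvHalves, pvVal]
  | case4 l h0 h1 m ihA ihB =>
    rw [pvHalves, if_neg h0, dif_neg h1]
    simp only []
    have hsplit := pvVal_append (l.take (l.length / 2)) (l.drop (l.length / 2))
    rw [List.take_append_drop] at hsplit
    rw [ihA, ihB, hsplit, List.length_drop]

theorem pvFoldCongr {α β : Type} (l : List β) (f g : α → β → α)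
    (h : ∀ (a : α) (x : β), x ∈ l → f a x = g a x) (init : α) :
    l.foldl f init = l.foldl g init := by
  induction l generalizing init with
  | nil => rfl
  | cons x xs ih =>
    simp only [List.foldl_cons]
    rw [h init x (List.mem_cons_self), ih]
    intro a y hy
    exact h a y (List.mem_cons_of_mem _ hy)

theorem pvA_fold (l : List Char) : ∀ (c : Int),
    (PySem.List.pyRange 0 (l.length : Int) 1).foldl
      (fun c i => if PySem.List.pyGetD l i ' ' = '1' then c + 2 ^ (((l.length : Int)) - i - 1).toNat else c) c
      = c + pvVal l := by
  induction l with
  | nil => intro c; simp [PySem.List.pyRange_one_eq_nil, pvVal]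
  | cons ch t ih =>
    intro c
    have hn : (0 : Int) < ((ch :: t).length : Int) := by simp only [List.length_cons]; push_cast; omega
    have h01 : (0 : Int) + 1 = 1 := by norm_num
    have hshift : PySem.List.pyRange 1 ((ch :: t).length : Int) 1
        = (PySem.List.pyRange 0 (t.length : Int) 1).map (· + 1) := by
      simp [PySem.List.pyRange_one, List.map_map]
      intro a _
      ring
    have hbody : ∀ (c : Int) (i : Int), i ∈ PySem.List.pyRange 0 (t.length : Int) 1 →
        (if PySem.List.pyGetD (ch :: t) (i + 1) ' ' = '1'
            then c + 2 ^ ((((ch :: t).length : Int)) - (i + 1) - 1).toNat else c)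
        = (if PySem.List.pyGetD t i ' ' = '1'
            then c + 2 ^ (((t.length : Int)) - i - 1).toNat else c) := by
      intro c i hi
      rw [PySem.List.mem_pyRange_one] at hi
      obtain ⟨k, rfl⟩ : ∃ k : Nat, i = (k : Int) := ⟨i.toNat, by omega⟩
      have h1 : ((k : Int) + 1) = ((k + 1 : Nat) : Int) := by push_cast; ring
      have h2 : (((ch :: t).length : Int) - ((k + 1 : Nat) : Int) - 1).toNat
          = ((t.length : Int) - (k : Int) - 1).toNat := by
        simp only [List.length_cons]; push_cast; omega
      rw [h1, PySem.List.pyGetD_natCast, PySem.List.pyGetD_natCast, h2]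
      simp [List.getD]
    rw [PySem.List.pyRange_one_cons hn, List.foldl_cons, h01, hshift, List.foldl_map]
    rw [pvFoldCongr _ _ _ (fun a x hx => hbody a x hx), ih]
    have hch : PySem.List.pyGetD (ch :: t) 0 ' ' = ch := PySem.List.pyGetD_zero_cons _ _ _
    have hexp : ((((ch :: t).length : Int)) - 0 - 1).toNat = t.length := by
      simp only [List.length_cons]; push_cast; omega
    rw [hch, hexp]
    rcases eq_or_ne ch '1' with h | h <;> simp [pvVal, h]; ring

-- ===== VERDICT =====
theorem str2binary_spec : Claim_equal_str2binary := by
  intro s _ _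
  unfold Spec_str2binary str2binary str2binary_alt
  rw [pvHalves_eq]
  simpa using pvA_fold s.toList 0
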